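-- pv_equiv track=rewrite | github.com/francohilt/lexer_parser | lexer.py | automata_dosPuntosIgual
-- ===== SOURCE A (Python) =====
-- RESULTADO_TRAMPA = "TRAMPA"
--
-- RESULTADO_ACEPTADO = "RESULTADO_ACEPTADO"
--
-- RESULTADO_NO_ACEPTADO = "RESULTADO_NO_ACEPTADO"
--
-- ESTADO_TRAMPA = -1
--
-- def automata_dosPuntosIgual (cadena):
--     estado = 0
--     final = 1
--
--     for caracter in cadena:
--         if estado == 0 and caracter == ':':
--             estado = 1
--         elif estado == 1 and caracter == '=':
--             estado = 1
--         else: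
--             estado = ESTADO_TRAMPA
--             break
--
--     if estado == ESTADO_TRAMPA:
--         return RESULTADO_TRAMPA
--     elif estado == final:
--         return RESULTADO_ACEPTADO
--     else:
--         return RESULTADO_NO_ACEPTADO
-- ===== SOURCE B (Python) =====
-- RESULTADO_TRAMPA = "TRAMPA"
-- RESULTADO_ACEPTADO = "RESULTADO_ACEPTADO"
-- RESULTADO_NO_ACEPTADO = "RESULTADO_NO_ACEPTADO"
--
-- def automata_dosPuntosIgual(cadena):
--     if not cadena:
--         return RESULTADO_NO_ACEPTADO
--     if cadena[0] == ':' and all(c == '=' for c in cadena[1:]):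
--         return RESULTADO_ACEPTADO
--     return RESULTADO_TRAMPA
-- ===== Notes on version B (the rewrite author's own statement) =====
-- stated objective: idiomatic
-- what changed: Replaced the per-character state-machine loop with a whole-string case analysis: empty -> NO_ACEPTADO, else head==':' and all remaining chars '=' -> ACEPTADO, else TRAMPA.
import Mathlib
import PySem

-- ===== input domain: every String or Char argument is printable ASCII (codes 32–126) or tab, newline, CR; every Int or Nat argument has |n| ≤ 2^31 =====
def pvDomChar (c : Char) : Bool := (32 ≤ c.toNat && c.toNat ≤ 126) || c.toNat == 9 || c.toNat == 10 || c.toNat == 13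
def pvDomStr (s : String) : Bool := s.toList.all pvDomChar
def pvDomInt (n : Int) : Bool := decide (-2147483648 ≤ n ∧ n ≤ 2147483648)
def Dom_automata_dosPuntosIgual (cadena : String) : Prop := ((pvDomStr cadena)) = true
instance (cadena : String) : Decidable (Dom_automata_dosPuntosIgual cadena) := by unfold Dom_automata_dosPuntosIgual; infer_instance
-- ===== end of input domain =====

-- B replaces A's per-character state machine with a whole-string case analysis (idiomatic).

-- ===== PORT A =====
-- the for-loop with break: recursion over the characters carrying `estado`; `break` = return -1 at once
def pvLoopA (estado : Int) : List Char → Int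
  | [] => estado
  | c :: rest =>
    if estado == 0 && c == ':' then pvLoopA 1 rest
    else if estado == 1 && c == '=' then pvLoopA 1 rest
    else (-1 : Int)

def automata_dosPuntosIgual (cadena : String) : String :=
  let estado := pvLoopA 0 cadena.toList
  let final : Int := 1
  if estado == -1 then "TRAMPA"
  else if estado == final then "RESULTADO_ACEPTADO"
  else "RESULTADO_NO_ACEPTADO"

-- ===== PORT B =====
def automata_dosPuntosIgual_alt (cadena : String) : String :=
  match cadena.toList with
  | [] => "RESULTADO_NO_ACEPTADO"
  | c :: rest =>
    if c == ':' && rest.all (fun d => d == '=') then "RESULTADO_ACEPTADO"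
    else "TRAMPA"

-- ===== PRECONDITION & SPEC =====
def Spec_automata_dosPuntosIgual (cadena : String) (out : String) : Prop := out = automata_dosPuntosIgual_alt cadena
instance (cadena : String) (out : String) : Decidable (Spec_automata_dosPuntosIgual cadena out) := by unfold Spec_automata_dosPuntosIgual; infer_instance

-- ===== CLAIM (what is proved, stated in full; the proofs are below) =====
def Claim_equal_automata_dosPuntosIgual : Prop := ∀ (cadena : String), Dom_automata_dosPuntosIgual cadena → Spec_automata_dosPuntosIgual cadena (automata_dosPuntosIgual cadena)

-- ===== LEMMAS AND PROOFS =====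

-- in state 1 the loop returns 1 iff every remaining character is '='
theorem pvLoopA_one (l : List Char) :
    pvLoopA 1 l = if l.all (fun d => d == '=') then 1 else -1 := by
  induction l with
  | nil => simp [pvLoopA]
  | cons c rest ih =>
    by_cases h : c = '='
    · simp [pvLoopA, h, ih]
    · simp [pvLoopA, h]

-- ===== VERDICT (by name: the statement is the Claim_ definition above) =====
theorem automata_dosPuntosIgual_spec : Claim_equal_automata_dosPuntosIgual := by
  intro cadena _
  unfold Spec_automata_dosPuntosIgual automata_dosPuntosIgual automata_dosPuntosIgual_alt
  cases hl : cadena.toList with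
  | nil => simp [pvLoopA]
  | cons c rest =>
    by_cases hc : c = ':'
    · by_cases hall : rest.all (fun d => d == '=') = true
      · simp [pvLoopA, hc, pvLoopA_one, hall]
      · simp [pvLoopA, hc, pvLoopA_one, hall]
    · simp [pvLoopA, hc]
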